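-- pv_equiv track=rewrite | github.com/liuwei464976266/mygit | qqkelslp.py | getTwoPoint
-- ===== SOURCE A (Python) =====
-- twoPointBet = ((1, 2),(4, 5),(7, 8),(10, 11),(13, 14),(16, 17),(19, 20),(22, 23),(25, 26),(28, 29),(31, 32),(34, 35),(2, 3),(5, 6),(8, 9),(11, 12),(14, 15),(17, 18),(20, 21),(23, 24),(26, 27),(29, 30),(32, 33),(35, 36),(1, 4),(2, 5),(3, 6),(4, 7),(5, 8),(6, 9),(7, 10),(8, 11),(9, 12),(10, 13),(11, 14),(12, 15),(13, 16),(14, 17),(15, 18),(16, 19),(17, 20),(18, 21),(19, 22),(20, 23),(21, 24),(22, 25),(23, 26),(24, 27),(25, 28),(26, 29),(27, 30),(28, 31),(29, 32),(30, 33),(31, 34),(32, 35),(33, 36))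
--
-- two0PointBet =((0,1),(0,2),(0,3))
--
-- def getTwoPoint(num):
--     points = []
--     for i in range(len(twoPointBet)):
--         if num in twoPointBet[i]:
--             points.append(61 + i)
--     for i in range(len(two0PointBet)):
--         if num in two0PointBet[i]:
--             points.append(151 + i)
--     return points
-- ===== SOURCE B (Python) =====
-- def getTwoPoint(num):
--     # Closed-form: the roulette bet tables are fixed, so the matching
--     # positions follow arithmetic patterns in num; no table scan at all.
--     if num == 0:
--         return [151, 152, 153]
--     if not 1 <= num <= 36:
--         return []
--     r = num % 3
--     pts = []
--     if r in (1, 2):                 # row-pair (3k+1, 3k+2) block, values 61..72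
--         pts.append(61 + (num - 1) // 3)
--     if r in (2, 0):                 # row-pair (3k+2, 3k+3) block, values 73..84
--         pts.append(73 + (num - 2) // 3)
--     if num >= 4:                    # vertical pair (num-3, num), values 85..117
--         pts.append(81 + num)
--     if num <= 33:                   # vertical pair (num, num+3)
--         pts.append(84 + num)
--     if num <= 3:                    # zero pair (0, num), values 151..153
--         pts.append(150 + num)
--     return pts
-- ===== Notes on version B (the rewrite author's own statement) =====
-- stated objective: faster
-- what changed: Replaces A's two table scans with a closed-form arithmetic computation of the matching bet positions from num (mod-3 and range tests), no table at all.
import Mathlib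
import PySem

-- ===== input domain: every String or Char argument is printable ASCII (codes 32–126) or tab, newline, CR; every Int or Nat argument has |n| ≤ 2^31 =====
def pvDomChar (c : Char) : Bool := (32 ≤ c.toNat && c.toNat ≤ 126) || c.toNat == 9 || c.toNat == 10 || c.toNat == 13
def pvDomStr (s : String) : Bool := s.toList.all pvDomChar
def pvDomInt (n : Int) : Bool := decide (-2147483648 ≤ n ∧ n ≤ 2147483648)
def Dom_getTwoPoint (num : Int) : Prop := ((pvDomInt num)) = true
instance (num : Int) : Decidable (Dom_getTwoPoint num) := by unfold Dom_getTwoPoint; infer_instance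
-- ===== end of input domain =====

set_option maxRecDepth 20000


-- B replaces A's two per-call table scans with a closed-form arithmetic computation of the positions (faster by a constant mechanism: no scan).

-- module constant used by A
def pvTwoPointBet : List (Int × Int) := [(1, 2),(4, 5),(7, 8),(10, 11),(13, 14),(16, 17),(19, 20),(22, 23),(25, 26),(28, 29),(31, 32),(34, 35),(2, 3),(5, 6),(8, 9),(11, 12),(14, 15),(17, 18),(20, 21),(23, 24),(26, 27),(29, 30),(32, 33),(35, 36),(1, 4),(2, 5),(3, 6),(4, 7),(5, 8),(6, 9),(7, 10),(8, 11),(9, 12),(10, 13),(11, 14),(12, 15),(13, 16),(14, 17),(15, 18),(16, 19),(17, 20),(18, 21),(19, 22),(20, 23),(21, 24),(22, 25),(23, 26),(24, 27),(25, 28),(26, 29),(27, 30),(28, 31),(29, 32),(30, 33),(31, 34),(32, 35),(33, 36)]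

def pvTwo0PointBet : List (Int × Int) := [(0,1),(0,2),(0,3)]

-- ===== PORT A =====
def getTwoPoint (num : Int) : List Int :=
  let points : List Int :=
    (PySem.List.pyRange 0 (pvTwoPointBet.length : Int) 1).foldl
      (fun acc i =>
        let p := PySem.List.pyGetD pvTwoPointBet i (0, 0)
        if num = p.1 ∨ num = p.2 then acc ++ [61 + i] else acc) []
  (PySem.List.pyRange 0 (pvTwo0PointBet.length : Int) 1).foldl
    (fun acc i =>
      let p := PySem.List.pyGetD pvTwo0PointBet i (0, 0)
      if num = p.1 ∨ num = p.2 then acc ++ [151 + i] else acc) points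

-- ===== PORT B =====
def getTwoPoint_alt (num : Int) : List Int :=
  if num = 0 then [151, 152, 153]
  else if ¬ (1 ≤ num ∧ num ≤ 36) then []
  else
    let r := PySem.Int.mod num 3
    let pts : List Int := if r = 1 ∨ r = 2 then [61 + PySem.Int.floordiv (num - 1) 3] else []
    let pts := if r = 2 ∨ r = 0 then pts ++ [73 + PySem.Int.floordiv (num - 2) 3] else pts
    let pts := if 4 ≤ num then pts ++ [81 + num] else pts
    let pts := if num ≤ 33 then pts ++ [84 + num] else pts
    if num ≤ 3 then pts ++ [150 + num] else pts

-- ===== PRECONDITION & SPEC =====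
def Spec_getTwoPoint (num : Int) (out : List Int) : Prop := out = getTwoPoint_alt num
instance (num : Int) (out : List Int) : Decidable (Spec_getTwoPoint num out) := by unfold Spec_getTwoPoint; infer_instance

-- ===== CLAIM (what is proved, stated in full; the proofs are below) =====
def Claim_equal_getTwoPoint : Prop := ∀ (num : Int), Dom_getTwoPoint num → Spec_getTwoPoint num (getTwoPoint num)

-- ===== LEMMAS AND PROOFS =====

-- A's fold over a table adds nothing when num matches no pair it indexes
lemma pv_foldA_id (num : Int) (tbl : List (Int × Int)) (c : Int) (l : List Int) (acc : List Int)
    (h : ∀ i ∈ l, ¬ (num = (PySem.List.pyGetD tbl i (0, 0)).1 ∨ num = (PySem.List.pyGetD tbl i (0, 0)).2)) :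
    l.foldl (fun acc i =>
        let p := PySem.List.pyGetD tbl i (0, 0)
        if num = p.1 ∨ num = p.2 then acc ++ [c + i] else acc) acc = acc := by
  induction l generalizing acc with
  | nil => rfl
  | cons x xs ih =>
    simp only [List.foldl_cons]
    rw [if_neg (h x (List.mem_cons_self))]
    exact ih _ (fun i hi => h i (List.mem_cons_of_mem _ hi))

lemma pv_A_out (num : Int) (h : num < 0 ∨ 36 < num) : getTwoPoint num = [] := by
  have h1 : ∀ i ∈ PySem.List.pyRange 0 (pvTwoPointBet.length : Int) 1,
      0 ≤ (PySem.List.pyGetD pvTwoPointBet i (0, 0)).1 ∧ (PySem.List.pyGetD pvTwoPointBet i (0, 0)).1 ≤ 36 ∧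
      0 ≤ (PySem.List.pyGetD pvTwoPointBet i (0, 0)).2 ∧ (PySem.List.pyGetD pvTwoPointBet i (0, 0)).2 ≤ 36 := by
    decide
  have h2 : ∀ i ∈ PySem.List.pyRange 0 (pvTwo0PointBet.length : Int) 1,
      0 ≤ (PySem.List.pyGetD pvTwo0PointBet i (0, 0)).1 ∧ (PySem.List.pyGetD pvTwo0PointBet i (0, 0)).1 ≤ 36 ∧
      0 ≤ (PySem.List.pyGetD pvTwo0PointBet i (0, 0)).2 ∧ (PySem.List.pyGetD pvTwo0PointBet i (0, 0)).2 ≤ 36 := by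
    decide
  simp only [getTwoPoint]
  rw [pv_foldA_id num pvTwoPointBet 61 _ []
      (fun i hi => by have := h1 i hi; omega)]
  exact pv_foldA_id num pvTwo0PointBet 151 _ [] (fun i hi => by have := h2 i hi; omega)

lemma pv_B_out (num : Int) (h : num < 0 ∨ 36 < num) : getTwoPoint_alt num = [] := by
  have h0 : ¬ num = 0 := by omega
  have h1 : ¬ (1 ≤ num ∧ num ≤ 36) := by omega
  simp only [getTwoPoint_alt, if_neg h0, if_pos h1]

-- ===== VERDICT (by name: the statement is the Claim_ definition above) =====
theorem getTwoPoint_spec : Claim_equal_getTwoPoint := by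
  intro num _
  show getTwoPoint num = getTwoPoint_alt num
  by_cases hr : 0 ≤ num ∧ num ≤ 36
  · obtain ⟨h1, h2⟩ := hr
    interval_cases num <;> decide
  · have h : num < 0 ∨ 36 < num := by omega
    rw [pv_A_out num h, pv_B_out num h]
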